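-- pv_equiv track=rewrite | github.com/kristinamiller/PythonFileConversion | array_parser.py | write_metadata_row
-- ===== SOURCE A (Python) =====
-- metadata_dict = {
--     'MS Level': ['cvParam: ms level,', ',', ','],
--     'Time': ['cvParam: scan start time', ',', ','],
--     'Polarity': ['cvParam: positive scan', ':', " "],
--     'SID': ['sid=', 'd=', " "],
--     'MS2 precursor': ['selected ion m/z,', ',', ','],
--     'HCD energy': ['collision energy,', ',', ','],
--     'tic': ['cvParam: total ion current,', ',', ' ']
-- }
--
-- def write_metadata_row(scan_number, lines):
--     output_dict = {'scan number': scan_number}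
--     # once we find the item for a column it breaks out of the inner loop and starts looking for the next one.
--     for column_name, search_inst in metadata_dict.items():
--         i = 0
--         while i < len(lines):
--             search_string_idx = lines[i].find(search_inst[0])
--             if search_string_idx > -1:
--                 start_idx = lines[i].find(search_inst[1]) + 2
--                 output_value = lines[i][start_idx:].strip()
--                 output_value = output_value.split(search_inst[2])[0]
--                 output_dict[column_name] = output_value
--                 break
--             i += 1
--
--     return(output_dict)
-- ===== SOURCE B (Python) =====
-- metadata_dict = {
--     'MS Level': ['cvParam: ms level,', ',', ','],
--     'Time': ['cvParam: scan start time', ',', ','],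
--     'Polarity': ['cvParam: positive scan', ':', " "],
--     'SID': ['sid=', 'd=', " "],
--     'MS2 precursor': ['selected ion m/z,', ',', ','],
--     'HCD energy': ['collision energy,', ',', ','],
--     'tic': ['cvParam: total ion current,', ',', ' ']
-- }
--
-- def write_metadata_row(scan_number, lines):
--     # One pass over the lines: record each column's value from its FIRST matching
--     # line, then assemble the row in the fixed column order.
--     found = {}
--     for line in lines:
--         for column_name, (marker, anchor, sep) in metadata_dict.items():
--             if column_name not in found and line.find(marker) > -1:
--                 start_idx = line.find(anchor) + 2
--                 found[column_name] = line[start_idx:].strip().split(sep)[0]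
--     row = {'scan number': scan_number}
--     for column_name in metadata_dict:
--         if column_name in found:
--             row[column_name] = found[column_name]
--     return row
-- ===== Notes on version B (the rewrite author's own statement) =====
-- stated objective: alternative
-- what changed: Instead of rescanning the whole line list once per column (7 top-to-bottom scans with a per-column break), B makes a single pass over the lines, recording each column's value from its first matching line into a findings dict, then assembles the row in the fixed column order.
import Mathlib
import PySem

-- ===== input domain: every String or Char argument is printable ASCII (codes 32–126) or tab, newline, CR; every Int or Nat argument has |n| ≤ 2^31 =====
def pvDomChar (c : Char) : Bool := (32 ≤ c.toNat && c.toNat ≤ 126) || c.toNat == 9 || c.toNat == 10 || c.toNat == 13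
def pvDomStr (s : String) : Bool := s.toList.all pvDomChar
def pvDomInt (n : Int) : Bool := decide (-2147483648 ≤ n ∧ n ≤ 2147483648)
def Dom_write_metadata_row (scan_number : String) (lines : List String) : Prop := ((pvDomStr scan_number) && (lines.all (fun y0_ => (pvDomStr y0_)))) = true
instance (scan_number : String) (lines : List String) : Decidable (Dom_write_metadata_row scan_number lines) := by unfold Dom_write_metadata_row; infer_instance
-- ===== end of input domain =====

-- B replaces A's seven top-to-bottom rescans of `lines` (one per column, with a per-column
-- break) by a single pass over the lines that records each column's value from its first
-- matching line, then assembles the row in the fixed column order (objective: alternative).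

-- module-level constant metadata_dict, shared by both Pythons: (column, marker, anchor, sep)
def pvMeta : List (String × String × String × String) :=
  [("MS Level", "cvParam: ms level,", ",", ","),
   ("Time", "cvParam: scan start time", ",", ","),
   ("Polarity", "cvParam: positive scan", ":", " "),
   ("SID", "sid=", "d=", " "),
   ("MS2 precursor", "selected ion m/z,", ",", ","),
   ("HCD energy", "collision energy,", ",", ","),
   ("tic", "cvParam: total ion current,", ",", " ")]

-- the extraction expression both Pythons share verbatim:
-- line[line.find(anchor)+2:].strip().split(sep)[0]
-- (sep is always "," or " ", so split? is `some` and its list nonempty: [0] never raises)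
def pvExtract (line anchor sep : String) : String :=
  let start_idx : Int := PySem.Str.find line anchor + 2
  (((PySem.Str.split? (PySem.Str.strip (PySem.Str.slice line (some start_idx) none)) sep).getD []).headD "")

-- ===== PORT A =====
-- A's inner `while i < len(lines): … break` as structural recursion over the same lines
def pvFindA (marker anchor sep : String) : List String → Option String
  | [] => none
  | line :: rest =>
    if PySem.Str.find line marker > -1 then some (pvExtract line anchor sep)
    else pvFindA marker anchor sep rest

def write_metadata_row (scan_number : String) (lines : List String) : List (String × String) :=
  let output_dict : PySem.Dict String String := (PySem.Dict.empty).insert "scan number" scan_number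
  (pvMeta.foldl (fun d c =>
    match pvFindA c.2.1 c.2.2.1 c.2.2.2 lines with
    | some v => d.insert c.1 v
    | none => d) output_dict).items

-- ===== PORT B =====
-- body of B's inner loop: one column tried against one line
def pvLineStep (line : String) (f : PySem.Dict String String)
    (c : String × String × String × String) : PySem.Dict String String :=
  if !f.contains c.1 && PySem.Str.find line c.2.1 > -1
  then f.insert c.1 (pvExtract line c.2.2.1 c.2.2.2)
  else f

-- one line of B's outer pass: try every column not yet found against this line
def pvStepLine (found : PySem.Dict String String) (line : String) : PySem.Dict String String :=
  pvMeta.foldl (pvLineStep line) found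

def write_metadata_row_alt (scan_number : String) (lines : List String) : List (String × String) :=
  let found : PySem.Dict String String := lines.foldl pvStepLine PySem.Dict.empty
  let row : PySem.Dict String String := (PySem.Dict.empty).insert "scan number" scan_number
  (pvMeta.foldl (fun r c =>
    match found.get? c.1 with
    | some v => r.insert c.1 v
    | none => r) row).items

-- ===== PRECONDITION & SPEC =====
def Spec_write_metadata_row (scan_number : String) (lines : List String) (out : List (String × String)) : Prop := out = write_metadata_row_alt scan_number lines
instance (scan_number : String) (lines : List String) (out : List (String × String)) : Decidable (Spec_write_metadata_row scan_number lines out) := by unfold Spec_write_metadata_row; infer_instance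

-- ===== CLAIM (what is proved, stated in full; the proofs are below) =====
def Claim_equal_write_metadata_row : Prop := ∀ (scan_number : String) (lines : List String), Dom_write_metadata_row scan_number lines → Spec_write_metadata_row scan_number lines (write_metadata_row scan_number lines)

-- ===== LEMMAS AND PROOFS =====

-- a key not named in the column list is untouched by the inner loop
theorem pv_fold_other (line : String) (L : List (String × String × String × String))
    (found : PySem.Dict String String) (k : String) (hk : k ∉ L.map (·.1)) :
    (L.foldl (pvLineStep line) found).get? k = found.get? k := by
  induction L generalizing found with
  | nil => rfl
  | cons c rest ih =>
    simp only [List.map_cons, List.mem_cons, not_or] at hk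
    simp only [List.foldl_cons]
    rw [ih _ hk.2]
    unfold pvLineStep
    split
    · simp [PySem.Dict.get?_insert, hk.1]
    · rfl

-- the inner loop over a duplicate-free column list, at one of its columns
theorem pv_fold_at (line : String) (L : List (String × String × String × String))
    (found : PySem.Dict String String) (name m a s : String)
    (hnd : (L.map (·.1)).Nodup) (hmem : (name, m, a, s) ∈ L) :
    (L.foldl (pvLineStep line) found).get? name =
      if found.get? name = none ∧ PySem.Str.find line m > -1
      then some (pvExtract line a s)
      else found.get? name := by
  induction L generalizing found with
  | nil => cases hmem
  | cons c rest ih =>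
    simp only [List.map_cons, List.nodup_cons] at hnd
    simp only [List.foldl_cons]
    rcases List.mem_cons.1 hmem with heq | hmem'
    · subst heq
      have hname : name ∉ rest.map (·.1) := hnd.1
      rw [pv_fold_other line rest _ name hname]
      unfold pvLineStep
      rw [PySem.Dict.contains_eq_isSome_get?]
      cases hg : found.get? name with
      | some v => simp [hg]
      | none =>
        by_cases hf : -1 < PySem.Chars.find line.toList m.toList <;>
          simp [hg, hf]
    · have hne : name ≠ c.1 := by
        intro h
        exact hnd.1 (h ▸ List.mem_map_of_mem hmem')
      have hstep : (pvLineStep line found c).get? name = found.get? name := by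
        unfold pvLineStep
        split
        · simp [PySem.Dict.get?_insert, hne]
        · rfl
      rw [ih (pvLineStep line found c) hnd.2 hmem', hstep]

-- the whole single pass, at a column of pvMeta: first-match semantics = A's per-column scan
theorem pv_pass (lines : List String) (found : PySem.Dict String String)
    (name m a s : String) (hmem : (name, m, a, s) ∈ pvMeta) :
    (lines.foldl pvStepLine found).get? name =
      match found.get? name with
      | some v => some v
      | none => pvFindA m a s lines := by
  induction lines generalizing found with
  | nil => cases h : found.get? name <;> simp [pvFindA, h]
  | cons l rest ih =>
    simp only [List.foldl_cons]
    rw [ih (pvStepLine found l),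
      show pvStepLine found l = pvMeta.foldl (pvLineStep l) found from rfl,
      pv_fold_at l pvMeta found name m a s (by decide) hmem]
    cases h : found.get? name with
    | some v => simp
    | none =>
      by_cases hf : -1 < PySem.Chars.find l.toList m.toList <;> simp [pvFindA, hf]

-- ===== VERDICT (by name: the statement is the Claim_ definition above) =====
theorem write_metadata_row_spec : Claim_equal_write_metadata_row := by
  intro scan_number lines _
  show write_metadata_row scan_number lines = write_metadata_row_alt scan_number lines
  unfold write_metadata_row write_metadata_row_alt
  have hfold :
      List.foldl (fun d c =>
          match pvFindA c.2.1 c.2.2.1 c.2.2.2 lines with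
          | some v => d.insert c.1 v
          | none => d) (PySem.Dict.empty.insert "scan number" scan_number) pvMeta
        = List.foldl (fun r c =>
          match (List.foldl pvStepLine PySem.Dict.empty lines).get? c.1 with
          | some v => r.insert c.1 v
          | none => r) (PySem.Dict.empty.insert "scan number" scan_number) pvMeta := by
    apply PySem.List.foldl_congr_mem
    intro acc c hc
    have h := pv_pass lines PySem.Dict.empty c.1 c.2.1 c.2.2.1 c.2.2.2 (by simpa using hc)
    simp only [PySem.Dict.get?_empty] at h
    rw [h]
  exact congrArg PySem.Dict.items hfold
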